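-- pv_equiv track=rewrite | github.com/daniel-lu32/sage-GUI | src/sagegui/gui.py | check_modification_syntax
-- ===== SOURCE A (Python) =====
-- def check_modification_syntax(list_of_strings):
--     amino_acids = ["A", "C", "D", "E", "F", "G", "H", "I", "K", "L", "M", "N", "P", "Q", "R", "S", "T", "V", "W", "Y"]
--     modifiers = ["^", "$", "[", "]"]
--     for string in list_of_strings:
--         if string == None:
--             return False
--         elif len(string) == 1:
--             if not (string in amino_acids or string in modifiers):
--                 return False
--         elif len(string) == 2:
--             if not (string[1] in amino_acids and string[0] in modifiers):
--                 return False
--         else: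
--             return False
--     return True
-- ===== SOURCE B (Python) =====
-- import re
--
-- _VALID_MOD = re.compile(r"[ACDEFGHIKLMNPQRSTVWY^$\[\]]|[\^$\[\]][ACDEFGHIKLMNPQRSTVWY]")
--
--
-- def check_modification_syntax(list_of_strings):
--     for s in list_of_strings:
--         if s is None or _VALID_MOD.fullmatch(s) is None:
--             return False
--     return True
-- ===== Notes on version B (the rewrite author's own statement) =====
-- stated objective: idiomatic
-- what changed: Replaces the per-string length/branch/list-membership cascade with one precompiled regex fullmatch (single char class of amino acids plus modifiers, or modifier followed by amino acid) applied to each string.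
import Mathlib
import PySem

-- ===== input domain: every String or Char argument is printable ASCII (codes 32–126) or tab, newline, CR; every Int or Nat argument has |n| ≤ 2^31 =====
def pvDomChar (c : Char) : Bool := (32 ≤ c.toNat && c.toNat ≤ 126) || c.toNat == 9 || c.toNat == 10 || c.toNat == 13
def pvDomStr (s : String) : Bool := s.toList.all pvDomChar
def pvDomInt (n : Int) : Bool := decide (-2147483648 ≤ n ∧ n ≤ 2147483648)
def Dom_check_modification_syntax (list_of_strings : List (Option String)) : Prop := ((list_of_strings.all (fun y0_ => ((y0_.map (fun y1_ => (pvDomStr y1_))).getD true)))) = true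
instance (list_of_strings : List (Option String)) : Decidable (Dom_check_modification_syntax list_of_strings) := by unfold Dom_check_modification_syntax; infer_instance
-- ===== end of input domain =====

-- B replaces A's length/branch/list-membership cascade with one regex fullmatch per string (idiomatic rewrite, same cost).


-- ===== PORT A =====
-- Python string equality/membership is code-point list equality, so the two
-- constant lists are kept as lists of code-point lists (each entry a 1-char string).
def pvAminoAcids : List (List Char) :=
  [['A'], ['C'], ['D'], ['E'], ['F'], ['G'], ['H'], ['I'], ['K'], ['L'],
   ['M'], ['N'], ['P'], ['Q'], ['R'], ['S'], ['T'], ['V'], ['W'], ['Y']]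
def pvModifiers : List (List Char) := [['^'], ['$'], ['['], [']']]

def check_modification_syntax (list_of_strings : List (Option String)) : Bool :=
  match list_of_strings with
  | [] => true
  | string :: rest =>
    match string with
    | none => false                                 -- if string == None: return False
    | some s =>
      let cs := s.toList
      if cs.length = 1 then
        if !(pvAminoAcids.contains cs || pvModifiers.contains cs) then false
        else check_modification_syntax rest
      else if cs.length = 2 then
        -- string[1] / string[0] are 1-char strings; membership tested as singleton lists
        if !(pvAminoAcids.contains [cs.getD 1 ' '] && pvModifiers.contains [cs.getD 0 ' ']) then false
        else check_modification_syntax rest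
      else false

-- ===== PORT B =====
-- Source B matches each string with re.fullmatch of
--   [ACDEFGHIKLMNPQRSTVWY^$\[\]] | [\^$\[\]][ACDEFGHIKLMNPQRSTVWY]
-- The regex is ported by hand (no regex engine in scope): fullmatch of this
-- pattern holds exactly on a single char of either class, or a modifier char
-- followed by an amino-acid char — exact on all strings.
def pvAAClass : List Char :=
  ['A','C','D','E','F','G','H','I','K','L','M','N','P','Q','R','S','T','V','W','Y']
def pvModClass : List Char := ['^', '$', '[', ']']

def pvFullmatchValidMod (s : String) : Bool :=
  match s.toList with
  | [c] => pvAAClass.contains c || pvModClass.contains c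
  | [m, c] => pvModClass.contains m && pvAAClass.contains c
  | _ => false

def check_modification_syntax_alt (list_of_strings : List (Option String)) : Bool :=
  list_of_strings.all (fun s? =>
    match s? with
    | none => false
    | some s => pvFullmatchValidMod s)

-- ===== PRECONDITION & SPEC =====
def Spec_check_modification_syntax (list_of_strings : List (Option String)) (out : Bool) : Prop := out = check_modification_syntax_alt list_of_strings
instance (list_of_strings : List (Option String)) (out : Bool) : Decidable (Spec_check_modification_syntax list_of_strings out) := by unfold Spec_check_modification_syntax; infer_instance

-- ===== CLAIM (what is proved, stated in full; the proofs are below) =====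
def Claim_equal_check_modification_syntax : Prop := ∀ (list_of_strings : List (Option String)), Dom_check_modification_syntax list_of_strings → Spec_check_modification_syntax list_of_strings (check_modification_syntax list_of_strings)

-- ===== LEMMAS AND PROOFS =====
theorem pvAmino_mem_singleton (c : Char) :
    [c] ∈ pvAminoAcids ↔ c ∈ pvAAClass := by
  simp [pvAminoAcids, pvAAClass]

theorem pvMod_mem_singleton (c : Char) :
    [c] ∈ pvModifiers ↔ c ∈ pvModClass := by
  simp [pvModifiers, pvModClass]

theorem pvElem_eq (s : String) (rest : List (Option String)) :
    check_modification_syntax (some s :: rest)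
      = (pvFullmatchValidMod s && check_modification_syntax rest) := by
  rw [check_modification_syntax]
  rcases h : s.toList with _ | ⟨c, _ | ⟨d, _ | ⟨e, t⟩⟩⟩ <;>
    simp only [h, pvFullmatchValidMod, List.length_cons, List.length_nil, List.getD]
  · simp
  · by_cases hv : c ∈ pvAAClass
    · simp [pvAmino_mem_singleton, hv]
    · by_cases hm : c ∈ pvModClass <;>
        simp [pvAmino_mem_singleton, pvMod_mem_singleton, hv, hm]
  · by_cases hm : c ∈ pvModClass <;> by_cases ha : d ∈ pvAAClass <;>
      simp [pvAmino_mem_singleton, pvMod_mem_singleton, hm, ha]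
  · simp

theorem pvMain (xs : List (Option String)) :
    check_modification_syntax xs = check_modification_syntax_alt xs := by
  induction xs with
  | nil => rfl
  | cons x rest ih =>
    cases x with
    | none => rfl
    | some s =>
      rw [pvElem_eq, ih]
      simp [check_modification_syntax_alt]

-- ===== VERDICT (by name: the statement is the Claim_ definition above) =====
theorem check_modification_syntax_spec : Claim_equal_check_modification_syntax := by
  intro xs _
  exact pvMain xs
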